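-- pv_equiv track=rewrite | github.com/stevenmburns/adventofcode | 2019/20/test_A.py | determine_path_lengths
-- ===== SOURCE A (Python) =====
-- def determine_path_lengths( board, inv_tag_tbl, p):
--     nrows = len(board)
--     ncols = len(board[0])
--
--     reached = set()
--     frontier = set( [p])
--     level = 0
--
--     length_tbl = { p: 0}
--
--     while frontier:
--
--         new_frontier = set()
--         for state in frontier:
--
--             (irow,icol) = state
--
--             dirs = [(-1,0),(1,0),(0,-1),(0,1)]
--
--             for drow,dcol in dirs:
--                 jrow,jcol = irow+drow,icol+dcol
--                 if 0 <= jrow < nrows and 0 <= jcol < ncols: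
--                     c = board[jrow][jcol]
--                     if c == '#': continue
--                     if c == ' ': continue
--                     if (jrow,jcol) in inv_tag_tbl:
--                         if (jrow,jcol) not in length_tbl:
--                             length_tbl[ (jrow,jcol)] = level+1
--                     new_frontier.add( (jrow,jcol))
--
--         reached = reached.union(frontier)
--         frontier = new_frontier.difference(reached)
--         level += 1
--
--     return length_tbl
-- ===== SOURCE B (Python) =====
-- def determine_path_lengths(board, inv_tag_tbl, p):
--     nrows = len(board)
--     ncols = len(board[0])
--
--     length_tbl = {p: 0}
--     visited = {p}
--     queue = [(p, 0)]
--
--     while queue: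
--         (irow, icol), dist = queue.pop(0)
--         for jrow, jcol in ((irow - 1, icol), (irow + 1, icol), (irow, icol - 1), (irow, icol + 1)):
--             if 0 <= jrow < nrows and 0 <= jcol < ncols:
--                 c = board[jrow][jcol]
--                 if c != '#' and c != ' ' and (jrow, jcol) not in visited:
--                     visited.add((jrow, jcol))
--                     if (jrow, jcol) in inv_tag_tbl:
--                         length_tbl[(jrow, jcol)] = dist + 1
--                     queue.append(((jrow, jcol), dist + 1))
--
--     return length_tbl
-- ===== Notes on version B (the rewrite author's own statement) =====
-- stated objective: simpler
-- what changed: A's level-synchronous BFS (frontier set, per-level new_frontier built with set add/union/difference and a level counter) is replaced by a single flat FIFO-queue BFS that carries each node's distance with it and filters at push time with a visited set.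
-- outside the precondition, e.g. on determine_path_lengths(['a#', '#'], set(), (0, 0)): A returns {(0, 0): 0}, B returns {(0, 0): 0}
import Mathlib
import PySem

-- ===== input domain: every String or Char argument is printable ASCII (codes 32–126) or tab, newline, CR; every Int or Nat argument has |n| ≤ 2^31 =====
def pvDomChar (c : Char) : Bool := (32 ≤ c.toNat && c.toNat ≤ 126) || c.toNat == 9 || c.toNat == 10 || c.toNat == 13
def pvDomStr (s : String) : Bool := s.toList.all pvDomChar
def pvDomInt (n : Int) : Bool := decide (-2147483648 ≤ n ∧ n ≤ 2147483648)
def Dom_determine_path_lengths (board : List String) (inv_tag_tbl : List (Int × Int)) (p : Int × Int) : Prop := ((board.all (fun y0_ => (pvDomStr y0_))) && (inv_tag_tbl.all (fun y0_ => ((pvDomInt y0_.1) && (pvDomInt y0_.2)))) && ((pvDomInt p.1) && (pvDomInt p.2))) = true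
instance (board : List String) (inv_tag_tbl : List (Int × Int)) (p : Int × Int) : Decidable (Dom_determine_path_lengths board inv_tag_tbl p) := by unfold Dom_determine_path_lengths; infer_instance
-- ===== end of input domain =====

-- B replaces A's level-synchronous frontier-set BFS (while frontier: … union/difference, level counter)
-- by a single flat FIFO-queue BFS carrying per-node distances; same return value (the proof is about the
-- return value only; neither version mutates its arguments).

-- shared primitive: board[r][c] (exact, via PySem.List.pyGet?/PySem.Str.pyGet?, wherever Python indexes
-- successfully; the '#'-default is only reached outside Pre_)
def pvCharAt (board : List String) (r c : Int) : Char :=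
  ((PySem.List.pyGet? board r).bind (fun s => PySem.Str.pyGet? s c)).getD '#'

-- ===== PORT A =====
def pvDirs : List (Int × Int) := [(-1, 0), (1, 0), (0, -1), (0, 1)]

-- the inner body of A, applied to one candidate cell j = (jrow, jcol); acc = (length_tbl, new_frontier)
def pvStepAJ (board : List String) (tag : List (Int × Int)) (nrows ncols level : Int)
    (acc : PySem.Dict (Int × Int) Int × PySem.Set (Int × Int)) (j : Int × Int) :
    PySem.Dict (Int × Int) Int × PySem.Set (Int × Int) :=
  if 0 ≤ j.1 ∧ j.1 < nrows ∧ 0 ≤ j.2 ∧ j.2 < ncols then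
    let c := pvCharAt board j.1 j.2
    if c = '#' then acc
    else if c = ' ' then acc
    else
      let tbl := if j ∈ tag then (if acc.1.contains j then acc.1 else acc.1.insert j (level + 1)) else acc.1
      (tbl, PySem.Set.add acc.2 j)
  else acc

-- 'for drow,dcol in dirs: …' for one frontier state
def pvStepA (board : List String) (tag : List (Int × Int)) (nrows ncols level : Int)
    (acc : PySem.Dict (Int × Int) Int × PySem.Set (Int × Int)) (st : Int × Int) :
    PySem.Dict (Int × Int) Int × PySem.Set (Int × Int) :=
  pvDirs.foldl (fun a d => pvStepAJ board tag nrows ncols level a (st.1 + d.1, st.2 + d.2)) acc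

-- 'while frontier: …' (fuel-guarded; the fuel chosen in determine_path_lengths is provably sufficient)
def pvLoopA (board : List String) (tag : List (Int × Int)) (nrows ncols : Int) :
    Nat → PySem.Set (Int × Int) → PySem.Set (Int × Int) → Int → PySem.Dict (Int × Int) Int →
    PySem.Dict (Int × Int) Int
  | 0, _, _, _, tbl => tbl
  | fuel + 1, reached, frontier, level, tbl =>
    if frontier = [] then tbl
    else
      let acc := frontier.foldl (pvStepA board tag nrows ncols level) (tbl, PySem.Set.empty)
      let reached2 := PySem.Set.union reached frontier
      pvLoopA board tag nrows ncols fuel reached2 (PySem.Set.diff acc.2 reached2) (level + 1) acc.1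

def determine_path_lengths (board : List String) (inv_tag_tbl : List (Int × Int)) (p : Int × Int) :
    List (Int × Int × Int) :=
  let nrows : Int := (board.length : Int)
  let ncols : Int := ((board.headD "").toList.length : Int)   -- len(board[0]); Pre_ excludes board = []
  let fuel : Nat := board.length * (board.headD "").toList.length + 3
  ((pvLoopA board inv_tag_tbl nrows ncols fuel PySem.Set.empty (PySem.Set.ofList [p]) 0
      (PySem.Dict.empty.insert p 0)).items).map (fun q => (q.1.1, q.1.2, q.2))

-- ===== PORT B =====
-- the four neighbours, exactly Source B's tuple
def pvNbrs (st : Int × Int) : List (Int × Int) :=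
  [(st.1 - 1, st.2), (st.1 + 1, st.2), (st.1, st.2 - 1), (st.1, st.2 + 1)]

-- the inner body of B for one neighbour j; acc = (visited, queue, length_tbl)
def pvStepB (board : List String) (tag : List (Int × Int)) (nrows ncols dist : Int)
    (acc : PySem.Set (Int × Int) × List ((Int × Int) × Int) × PySem.Dict (Int × Int) Int)
    (j : Int × Int) :
    PySem.Set (Int × Int) × List ((Int × Int) × Int) × PySem.Dict (Int × Int) Int :=
  if 0 ≤ j.1 ∧ j.1 < nrows ∧ 0 ≤ j.2 ∧ j.2 < ncols then
    let c := pvCharAt board j.1 j.2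
    if c ≠ '#' ∧ c ≠ ' ' ∧ PySem.Set.contains acc.1 j = false then
      (PySem.Set.add acc.1 j,
       acc.2.1 ++ [(j, dist + 1)],
       if j ∈ tag then acc.2.2.insert j (dist + 1) else acc.2.2)
    else acc
  else acc

-- 'while queue: (st, dist) = queue.pop(0); …' (fuel-guarded, same sufficient fuel)
def pvLoopB (board : List String) (tag : List (Int × Int)) (nrows ncols : Int) :
    Nat → PySem.Set (Int × Int) → List ((Int × Int) × Int) → PySem.Dict (Int × Int) Int →
    PySem.Dict (Int × Int) Int
  | 0, _, _, tbl => tbl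
  | fuel + 1, visited, queue, tbl =>
    match queue with
    | [] => tbl
    | (st, dist) :: rest =>
      let acc := (pvNbrs st).foldl (pvStepB board tag nrows ncols dist) (visited, rest, tbl)
      pvLoopB board tag nrows ncols fuel acc.1 acc.2.1 acc.2.2

def determine_path_lengths_alt (board : List String) (inv_tag_tbl : List (Int × Int)) (p : Int × Int) :
    List (Int × Int × Int) :=
  let nrows : Int := (board.length : Int)
  let ncols : Int := ((board.headD "").toList.length : Int)
  let fuel : Nat := board.length * (board.headD "").toList.length + 3
  ((pvLoopB board inv_tag_tbl nrows ncols fuel (PySem.Set.ofList [p]) [(p, 0)]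
      (PySem.Dict.empty.insert p 0)).items).map (fun q => (q.1.1, q.1.2, q.2))

-- ===== PRECONDITION & SPEC =====
-- Pre_ excludes the inputs where Python A raises IndexError: the empty board (board[0]) and ragged
-- boards (a row shorter than row 0) whose short rows the search could index; conservatively, ragged
-- boards are kept only when p has no in-bounds neighbour (then A reads nothing beyond board[0]), so a
-- few ragged boards on which A happens to return are excluded too.
def Pre_determine_path_lengths (board : List String) (inv_tag_tbl : List (Int × Int)) (p : Int × Int) : Prop :=
  board ≠ [] ∧
  ((∀ s ∈ board, (board.headD "").toList.length ≤ s.toList.length) ∨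
    (¬ ((0 ≤ p.1 - 1 ∧ p.1 - 1 < (board.length : Int) ∧ 0 ≤ p.2 ∧ p.2 < ((board.headD "").toList.length : Int)) ∨
        (0 ≤ p.1 + 1 ∧ p.1 + 1 < (board.length : Int) ∧ 0 ≤ p.2 ∧ p.2 < ((board.headD "").toList.length : Int)) ∨
        (0 ≤ p.1 ∧ p.1 < (board.length : Int) ∧ 0 ≤ p.2 - 1 ∧ p.2 - 1 < ((board.headD "").toList.length : Int)) ∨
        (0 ≤ p.1 ∧ p.1 < (board.length : Int) ∧ 0 ≤ p.2 + 1 ∧ p.2 + 1 < ((board.headD "").toList.length : Int)))))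
instance (board : List String) (inv_tag_tbl : List (Int × Int)) (p : Int × Int) :
    Decidable (Pre_determine_path_lengths board inv_tag_tbl p) := by
  unfold Pre_determine_path_lengths; infer_instance

def pvWitness_determine_path_lengths : List String × (List (Int × Int)) × (Int × Int) :=
  (["a.b", ".#.", "c.d"], [(0, 2), (2, 0)], (1, 0))

def Spec_determine_path_lengths (board : List String) (inv_tag_tbl : List (Int × Int)) (p : Int × Int) (out : List (Int × Int × Int)) : Prop := out = determine_path_lengths_alt board inv_tag_tbl p
instance (board : List String) (inv_tag_tbl : List (Int × Int)) (p : Int × Int) (out : List (Int × Int × Int)) : Decidable (Spec_determine_path_lengths board inv_tag_tbl p out) := by unfold Spec_determine_path_lengths; infer_instance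

-- ===== CLAIM (what is proved, stated in full; the proofs are below) =====
def Claim_equal_determine_path_lengths : Prop := ∀ (board : List String) (inv_tag_tbl : List (Int × Int)) (p : Int × Int), Dom_determine_path_lengths board inv_tag_tbl p → Pre_determine_path_lengths board inv_tag_tbl p → Spec_determine_path_lengths board inv_tag_tbl p (determine_path_lengths board inv_tag_tbl p)

-- ===== LEMMAS AND PROOFS =====

-- the queue entries B has pushed during the current level, given A's new_frontier so far
def pvPushes (base newf : PySem.Set (Int × Int)) (level : Int) : List ((Int × Int) × Int) :=
  (newf.filter (fun j => !(PySem.Set.contains base j))).map (fun j => (j, level + 1))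

-- the mid-level relation between A's (length_tbl, new_frontier) and B's (visited, queue, tbl)
def pvInv (tag : List (Int × Int)) (nrows ncols : Int) (base visited newf : PySem.Set (Int × Int))
    (tbl : PySem.Dict (Int × Int) Int) : Prop :=
  (∀ x : Int × Int, x ∈ visited ↔ x ∈ base ∨ x ∈ newf) ∧
  (∀ j : Int × Int, j ∈ visited → j ∈ tag → tbl.contains j = true) ∧
  (∀ j : Int × Int, tbl.contains j = true → j ∈ visited) ∧
  newf.Nodup ∧
  (∀ x ∈ newf, 0 ≤ x.1 ∧ x.1 < nrows ∧ 0 ≤ x.2 ∧ x.2 < ncols)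

lemma pvMem_of_contains_eq_false {s : PySem.Set (Int × Int)} {j : Int × Int}
    (h : PySem.Set.contains s j = false) : j ∉ s := by
  intro hj
  rw [(PySem.Set.contains_iff s j).mpr hj] at h
  simp at h

lemma pvContains_eq_false_of_not_mem {s : PySem.Set (Int × Int)} {j : Int × Int}
    (h : j ∉ s) : PySem.Set.contains s j = false := by
  cases hc : PySem.Set.contains s j
  · rfl
  · exact absurd ((PySem.Set.contains_iff s j).mp hc) h

lemma pushes_add_of_mem_base (base newf : PySem.Set (Int × Int)) (j : Int × Int) (level : Int)
    (hjb : j ∈ base) : pvPushes base (PySem.Set.add newf j) level = pvPushes base newf level := by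
  by_cases hj : j ∈ newf
  · rw [PySem.Set.add_of_mem hj]
  · rw [PySem.Set.add_of_not_mem hj]
    unfold pvPushes
    rw [List.filter_append]
    simpa using hjb

lemma pushes_add_of_not_mem_base (base newf : PySem.Set (Int × Int)) (j : Int × Int) (level : Int)
    (hjb : j ∉ base) (hjn : j ∉ newf) :
    pvPushes base (PySem.Set.add newf j) level = pvPushes base newf level ++ [(j, level + 1)] := by
  rw [PySem.Set.add_of_not_mem hjn]
  unfold pvPushes
  rw [List.filter_append, List.map_append]
  simpa using hjb

lemma pvStepA_eq (board : List String) (tag : List (Int × Int)) (nrows ncols level : Int)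
    (acc : PySem.Dict (Int × Int) Int × PySem.Set (Int × Int)) (st : Int × Int) :
    pvStepA board tag nrows ncols level acc st
      = (pvNbrs st).foldl (pvStepAJ board tag nrows ncols level) acc := by
  have h : pvNbrs st = pvDirs.map (fun d => (st.1 + d.1, st.2 + d.2)) := by
    simp [pvNbrs, pvDirs, sub_eq_add_neg]
  rw [pvStepA, h, List.foldl_map]
lemma pushes_add_of_visited (base newf : PySem.Set (Int × Int)) (j : Int × Int) (level : Int)
    (h : j ∈ base ∨ j ∈ newf) :
    pvPushes base (PySem.Set.add newf j) level = pvPushes base newf level := by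
  by_cases hj : j ∈ newf
  · rw [PySem.Set.add_of_mem hj]
  · exact pushes_add_of_mem_base base newf j level (h.resolve_right hj)

lemma pvStep_rel (board : List String) (tag : List (Int × Int)) (nrows ncols level : Int)
    (base visited newf : PySem.Set (Int × Int)) (tbl : PySem.Dict (Int × Int) Int)
    (Q0 : List ((Int × Int) × Int)) (j : Int × Int)
    (h : pvInv tag nrows ncols base visited newf tbl) :
    (pvStepB board tag nrows ncols level (visited, Q0 ++ pvPushes base newf level, tbl) j).2.1
        = Q0 ++ pvPushes base (pvStepAJ board tag nrows ncols level (tbl, newf) j).2 level ∧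
    (pvStepB board tag nrows ncols level (visited, Q0 ++ pvPushes base newf level, tbl) j).2.2
        = (pvStepAJ board tag nrows ncols level (tbl, newf) j).1 ∧
    pvInv tag nrows ncols base
      (pvStepB board tag nrows ncols level (visited, Q0 ++ pvPushes base newf level, tbl) j).1
      (pvStepAJ board tag nrows ncols level (tbl, newf) j).2
      (pvStepAJ board tag nrows ncols level (tbl, newf) j).1 := by
  obtain ⟨hv, hT1, hT2, hnd, hbd⟩ := h
  by_cases hb : 0 ≤ j.1 ∧ j.1 < nrows ∧ 0 ≤ j.2 ∧ j.2 < ncols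
  · by_cases hch : pvCharAt board j.1 j.2 = '#'
    · simp only [pvStepAJ, pvStepB, if_pos hb]
      rw [if_pos hch, if_neg (by simp [hch])]
      exact ⟨by trivial, by trivial, hv, hT1, hT2, hnd, hbd⟩
    · by_cases hcs : pvCharAt board j.1 j.2 = ' '
      · simp only [pvStepAJ, pvStepB, if_pos hb]
        rw [if_neg hch, if_pos hcs, if_neg (by simp [hcs])]
        exact ⟨by trivial, by trivial, hv, hT1, hT2, hnd, hbd⟩
      · by_cases hvj : j ∈ visited
        · have hcv : PySem.Set.contains visited j = true := (PySem.Set.contains_iff visited j).mpr hvj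
          have htbl : (if j ∈ tag then (if tbl.contains j then tbl else tbl.insert j (level + 1)) else tbl) = tbl := by
            by_cases ht : j ∈ tag
            · simp [ht, hT1 j hvj ht]
            · simp [ht]
          simp only [pvStepAJ, pvStepB, if_pos hb]
          rw [if_neg hch, if_neg hcs,
            if_neg (by intro hcon; exact (pvMem_of_contains_eq_false hcon.2.2) hvj), htbl]
          have hbn : j ∈ base ∨ j ∈ newf := (hv j).mp hvj
          refine ⟨by rw [pushes_add_of_visited base newf j level hbn], by trivial, ?_, hT1, hT2,
            PySem.Set.nodup_add newf j hnd, ?_⟩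
          · intro x
            rw [hv x, PySem.Set.mem_add]
            constructor
            · rintro (hx | hx)
              · exact Or.inl hx
              · exact Or.inr (Or.inl hx)
            · rintro (hx | hx | hx)
              · exact Or.inl hx
              · exact Or.inr hx
              · subst hx; exact hbn
          · intro x hx
            rcases (PySem.Set.mem_add newf j x).mp hx with hx | hx
            · exact hbd x hx
            · subst hx; exact hb
        · -- fresh cell: both sides record and push it
          have hcv : PySem.Set.contains visited j = false := pvContains_eq_false_of_not_mem hvj
          have hjb : j ∉ base := fun hx => hvj ((hv j).mpr (Or.inl hx))
          have hjn : j ∉ newf := fun hx => hvj ((hv j).mpr (Or.inr hx))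
          have hct : tbl.contains j = false := by
            cases hc : tbl.contains j
            · rfl
            · exact absurd (hT2 j hc) hvj
          have htbl : (if j ∈ tag then (if tbl.contains j then tbl else tbl.insert j (level + 1)) else tbl)
              = (if j ∈ tag then tbl.insert j (level + 1) else tbl) := by
            by_cases ht : j ∈ tag <;> simp [ht, hct]
          simp only [pvStepAJ, pvStepB, if_pos hb]
          rw [if_neg hch, if_neg hcs, if_pos (⟨hch, hcs, hcv⟩ :
            pvCharAt board j.1 j.2 ≠ '#' ∧ pvCharAt board j.1 j.2 ≠ ' ' ∧
              PySem.Set.contains visited j = false), htbl]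
          refine ⟨?_, by trivial, ?_, ?_, ?_,
            PySem.Set.nodup_add newf j hnd, ?_⟩
          · rw [pushes_add_of_not_mem_base base newf j level hjb hjn, List.append_assoc]
          · intro x
            rw [PySem.Set.mem_add, PySem.Set.mem_add, hv x]
            tauto
          · intro x hx ht
            rcases (PySem.Set.mem_add visited j x).mp hx with hx | hx
            · by_cases htj : j ∈ tag
              · simp only [if_pos htj, PySem.Dict.contains_insert, hT1 x hx ht, Bool.or_true]
              · simp only [if_neg htj]; exact hT1 x hx ht
            · subst hx
              simp only [if_pos ht, PySem.Dict.contains_insert_self]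
          · intro x hx
            by_cases htj : j ∈ tag
            · simp only [if_pos htj, PySem.Dict.contains_insert] at hx
              rcases Bool.or_eq_true_iff.mp hx with hx | hx
              · rw [PySem.Set.mem_add]
                exact Or.inr (by simpa using hx)
              · exact (PySem.Set.mem_add visited j x).mpr (Or.inl (hT2 x hx))
            · simp only [if_neg htj] at hx
              exact (PySem.Set.mem_add visited j x).mpr (Or.inl (hT2 x hx))
          · intro x hx
            rcases (PySem.Set.mem_add newf j x).mp hx with hx | hx
            · exact hbd x hx
            · subst hx; exact hb
  · simp only [pvStepAJ, pvStepB, if_neg hb]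
    exact ⟨by trivial, by trivial, hv, hT1, hT2, hnd, hbd⟩
lemma pvFold_rel (board : List String) (tag : List (Int × Int)) (nrows ncols level : Int)
    (base : PySem.Set (Int × Int)) (js : List (Int × Int)) :
    ∀ (visited newf : PySem.Set (Int × Int)) (tbl : PySem.Dict (Int × Int) Int)
      (Q0 : List ((Int × Int) × Int)),
    pvInv tag nrows ncols base visited newf tbl →
    (js.foldl (pvStepB board tag nrows ncols level) (visited, Q0 ++ pvPushes base newf level, tbl)).2.1
        = Q0 ++ pvPushes base (js.foldl (pvStepAJ board tag nrows ncols level) (tbl, newf)).2 level ∧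
    (js.foldl (pvStepB board tag nrows ncols level) (visited, Q0 ++ pvPushes base newf level, tbl)).2.2
        = (js.foldl (pvStepAJ board tag nrows ncols level) (tbl, newf)).1 ∧
    pvInv tag nrows ncols base
      (js.foldl (pvStepB board tag nrows ncols level) (visited, Q0 ++ pvPushes base newf level, tbl)).1
      (js.foldl (pvStepAJ board tag nrows ncols level) (tbl, newf)).2
      (js.foldl (pvStepAJ board tag nrows ncols level) (tbl, newf)).1 := by
  induction js with
  | nil => intro visited newf tbl Q0 h; exact ⟨rfl, rfl, h⟩
  | cons j js ih =>
    intro visited newf tbl Q0 h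
    obtain ⟨h1, h2, h3⟩ := pvStep_rel board tag nrows ncols level base visited newf tbl Q0 j h
    simp only [List.foldl_cons]
    have hB : pvStepB board tag nrows ncols level (visited, Q0 ++ pvPushes base newf level, tbl) j
        = ((pvStepB board tag nrows ncols level (visited, Q0 ++ pvPushes base newf level, tbl) j).1,
           Q0 ++ pvPushes base (pvStepAJ board tag nrows ncols level (tbl, newf) j).2 level,
           (pvStepAJ board tag nrows ncols level (tbl, newf) j).1) := by
      refine Prod.ext rfl (Prod.ext ?_ ?_) <;> simp [h1, h2]
    rw [hB]
    exact ih _ _ _ _ h3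
lemma pvLevel_rel (board : List String) (tag : List (Int × Int)) (nrows ncols level : Int)
    (base : PySem.Set (Int × Int)) (L : List (Int × Int)) :
    ∀ (f : Nat) (visited newf : PySem.Set (Int × Int)) (tbl : PySem.Dict (Int × Int) Int),
    pvInv tag nrows ncols base visited newf tbl →
    ∃ visited2 : PySem.Set (Int × Int),
      pvLoopB board tag nrows ncols (L.length + f) visited
          (L.map (fun s => (s, level)) ++ pvPushes base newf level) tbl
        = pvLoopB board tag nrows ncols f visited2
            (pvPushes base (L.foldl (pvStepA board tag nrows ncols level) (tbl, newf)).2 level)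
            (L.foldl (pvStepA board tag nrows ncols level) (tbl, newf)).1 ∧
      pvInv tag nrows ncols base visited2
        (L.foldl (pvStepA board tag nrows ncols level) (tbl, newf)).2
        (L.foldl (pvStepA board tag nrows ncols level) (tbl, newf)).1 := by
  induction L with
  | nil =>
    intro f visited newf tbl h
    exact ⟨visited, by simp, h⟩
  | cons st L ih =>
    intro f visited newf tbl h
    have hfuel : (st :: L).length + f = (L.length + f) + 1 := by
      simp only [List.length_cons]; omega
    rw [hfuel]
    simp only [List.map_cons, List.cons_append, List.foldl_cons]
    rw [pvLoopB]
    obtain ⟨h1, h2, h3⟩ := pvFold_rel board tag nrows ncols level base (pvNbrs st)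
      visited newf tbl (L.map (fun s => (s, level))) h
    have hacc : (pvNbrs st).foldl (pvStepB board tag nrows ncols level)
          (visited, L.map (fun s => (s, level)) ++ pvPushes base newf level, tbl)
        = (((pvNbrs st).foldl (pvStepB board tag nrows ncols level)
              (visited, L.map (fun s => (s, level)) ++ pvPushes base newf level, tbl)).1,
           L.map (fun s => (s, level)) ++ pvPushes base
             (pvStepA board tag nrows ncols level (tbl, newf) st).2 level,
           (pvStepA board tag nrows ncols level (tbl, newf) st).1) := by
      refine Prod.ext rfl (Prod.ext ?_ ?_) <;>
        simp [h1, h2, pvStepA_eq]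
    rw [hacc]
    have h3' : pvInv tag nrows ncols base
        (((pvNbrs st).foldl (pvStepB board tag nrows ncols level)
            (visited, L.map (fun s => (s, level)) ++ pvPushes base newf level, tbl)).1)
        (pvStepA board tag nrows ncols level (tbl, newf) st).2
        (pvStepA board tag nrows ncols level (tbl, newf) st).1 := by
      rw [pvStepA_eq]; exact h3
    exact ih f _ _ _ h3'
lemma pvLoop_rel (board : List String) (tag : List (Int × Int)) (nrows ncols : Int)
    (U : Finset (Int × Int))
    (hU : ∀ x : Int × Int, 0 ≤ x.1 ∧ x.1 < nrows ∧ 0 ≤ x.2 ∧ x.2 < ncols → x ∈ U) :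
    ∀ (fA fB : Nat) (reached frontier visited : PySem.Set (Int × Int)) (level : Int)
      (tbl : PySem.Dict (Int × Int) Int),
    (∀ x : Int × Int, x ∈ visited ↔ x ∈ reached ∨ x ∈ frontier) →
    (∀ j : Int × Int, j ∈ visited → j ∈ tag → tbl.contains j = true) →
    (∀ j : Int × Int, tbl.contains j = true → j ∈ visited) →
    frontier.Nodup → reached.Nodup →
    (∀ x ∈ frontier, x ∉ reached) →
    (∀ x ∈ frontier, x ∈ U) → (∀ x ∈ reached, x ∈ U) →
    (U \ reached.toFinset).card + 1 ≤ fA →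
    (U \ reached.toFinset).card + 1 ≤ fB →
    pvLoopA board tag nrows ncols fA reached frontier level tbl
      = pvLoopB board tag nrows ncols fB visited (frontier.map (fun s => (s, level))) tbl := by
  intro fA
  induction fA with
  | zero =>
    intro fB reached frontier visited level tbl _ _ _ _ _ _ _ _ hfA _
    omega
  | succ fA ih =>
    intro fB reached frontier visited level tbl hv hT1 hT2 hndF hndR hdisj hFU hRU hfA hfB
    by_cases hfe : frontier = []
    · subst hfe
      obtain ⟨fB', rfl⟩ : ∃ fB', fB = fB' + 1 := ⟨fB - 1, by omega⟩
      simp [pvLoopA, pvLoopB]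
    · -- one level of A corresponds to frontier.length pops of B
      set base := PySem.Set.union reached frontier with hbase
      have hmemb : ∀ x : Int × Int, x ∈ base ↔ x ∈ reached ∨ x ∈ frontier :=
        fun x => PySem.Set.mem_union reached frontier x
      have hInv0 : pvInv tag nrows ncols base visited PySem.Set.empty tbl := by
        refine ⟨?_, hT1, hT2, List.nodup_nil, by simp [PySem.Set.empty]⟩
        intro x
        simp only [PySem.Set.empty, List.not_mem_nil, or_false, hmemb, hv x]
      -- card bookkeeping
      have hflen : frontier.toFinset.card = frontier.length := List.toFinset_card_of_nodup hndF
      have hsub : frontier.toFinset ⊆ U \ reached.toFinset := by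
        intro x hx
        rw [List.mem_toFinset] at hx
        rw [Finset.mem_sdiff, List.mem_toFinset]
        exact ⟨hFU x hx, hdisj x hx⟩
      have hflenle : frontier.length ≤ (U \ reached.toFinset).card := by
        rw [← hflen]; exact Finset.card_le_card hsub
      have hfpos : 0 < frontier.length := List.length_pos_iff.mpr hfe
      have hbardF : base.toFinset = reached.toFinset ∪ frontier.toFinset := by
        ext x
        simp only [List.mem_toFinset, Finset.mem_union, hmemb x]
      have hsd : U \ base.toFinset = (U \ reached.toFinset) \ frontier.toFinset := by
        rw [hbardF]
        ext x
        simp only [Finset.mem_sdiff, Finset.mem_union]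
        tauto
      have hm2 : (U \ base.toFinset).card = (U \ reached.toFinset).card - frontier.length := by
        rw [hsd, Finset.card_sdiff, Finset.inter_eq_left.mpr hsub, hflen]
      -- run the level
      obtain ⟨visited2, hBeq, hInv2⟩ := pvLevel_rel board tag nrows ncols level base frontier
        (fB - frontier.length) visited PySem.Set.empty tbl hInv0
      have hfuel : frontier.length + (fB - frontier.length) = fB := by omega
      have hq0 : frontier.map (fun s => (s, level))
          = frontier.map (fun s => (s, level)) ++ pvPushes base PySem.Set.empty level := by
        simp [pvPushes, PySem.Set.empty]
      rw [hfuel] at hBeq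
      -- A's step
      rw [pvLoopA, if_neg hfe]
      rw [hq0, hBeq]
      set acc := frontier.foldl (pvStepA board tag nrows ncols level) (tbl, PySem.Set.empty) with hacc
      have hpush : pvPushes base acc.2 level
          = (PySem.Set.diff acc.2 base).map (fun s => (s, level + 1)) := rfl
      rw [hpush]
      -- invariants for the next level
      obtain ⟨hv2, hT12, hT22, hnd2, hbd2⟩ := hInv2
      refine ih (fB - frontier.length) base (PySem.Set.diff acc.2 base) visited2 (level + 1) acc.1
        ?_ hT12 hT22 (PySem.Set.nodup_diff acc.2 base hnd2) (PySem.Set.nodup_union reached frontier hndR)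
        ?_ ?_ ?_ ?_ ?_
      · intro x
        rw [hv2 x, PySem.Set.mem_diff]
        by_cases hxb : x ∈ base <;> tauto
      · intro x hx
        exact ((PySem.Set.mem_diff acc.2 base x).mp hx).2
      · intro x hx
        exact hU x (hbd2 x ((PySem.Set.mem_diff acc.2 base x).mp hx).1)
      · intro x hx
        rcases (hmemb x).mp hx with hx | hx
        · exact hRU x hx
        · exact hFU x hx
      · omega
      · omega

-- ===== VERDICT (by name: the statement is the Claim_ definition above) =====
theorem determine_path_lengths_spec : Claim_equal_determine_path_lengths := by
  intro board tag p _ _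
  show determine_path_lengths board tag p = determine_path_lengths_alt board tag p
  have hof : PySem.Set.ofList [p] = [p] := rfl
  have hU : ∀ x : Int × Int,
      0 ≤ x.1 ∧ x.1 < (board.length : Int) ∧ 0 ≤ x.2 ∧ x.2 < ((board.headD "").toList.length : Int) →
      x ∈ insert p (Finset.Icc (0:ℤ) ((board.length : Int) - 1) ×ˢ
        Finset.Icc (0:ℤ) (((board.headD "").toList.length : Int) - 1)) := by
    intro x hx
    apply Finset.mem_insert_of_mem
    rw [Finset.mem_product, Finset.mem_Icc, Finset.mem_Icc]
    omega
  have hT1 : ∀ j : Int × Int, j ∈ ([p] : List (Int × Int)) → j ∈ tag →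
      (PySem.Dict.empty.insert p (0:Int)).contains j = true := by
    intro j hj _
    have : j = p := by simpa using hj
    subst this
    exact PySem.Dict.contains_insert_self _ _ _
  have hT2 : ∀ j : Int × Int, (PySem.Dict.empty.insert p (0:Int)).contains j = true →
      j ∈ ([p] : List (Int × Int)) := by
    intro j hj
    rw [PySem.Dict.contains_insert] at hj
    simp only [PySem.Dict.contains_empty, Bool.or_false, beq_iff_eq] at hj
    simp [hj]
  have hcA : (Finset.Icc (0:ℤ) ((board.length : Int) - 1)).card = board.length := by
    rw [Int.card_Icc]; omega
  have hcB : (Finset.Icc (0:ℤ) (((board.headD "").toList.length : Int) - 1)).card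
      = (board.headD "").toList.length := by
    rw [Int.card_Icc]; omega
  have hUcard : (insert p (Finset.Icc (0:ℤ) ((board.length : Int) - 1) ×ˢ
        Finset.Icc (0:ℤ) (((board.headD "").toList.length : Int) - 1))).card
      ≤ board.length * (board.headD "").toList.length + 1 := by
    refine le_trans (Finset.card_insert_le _ _) ?_
    rw [Finset.card_product, hcA, hcB]
  have hloop := pvLoop_rel board tag (board.length : Int) ((board.headD "").toList.length : Int)
    (insert p (Finset.Icc (0:ℤ) ((board.length : Int) - 1) ×ˢ
      Finset.Icc (0:ℤ) (((board.headD "").toList.length : Int) - 1))) hU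
    (board.length * (board.headD "").toList.length + 3)
    (board.length * (board.headD "").toList.length + 3)
    PySem.Set.empty (PySem.Set.ofList [p]) (PySem.Set.ofList [p]) 0
    (PySem.Dict.empty.insert p 0)
    (by rw [hof]; intro x; simp [PySem.Set.empty])
    (by rw [hof]; exact hT1)
    (by rw [hof]; exact hT2)
    (by rw [hof]; simp)
    (by simp [PySem.Set.empty])
    (by rw [hof]; simp [PySem.Set.empty])
    (by rw [hof]; intro x hx; simp only [List.mem_singleton] at hx; subst hx; exact Finset.mem_insert_self _ _)
    (by simp [PySem.Set.empty])
    (by simp only [PySem.Set.empty, List.toFinset_nil, Finset.sdiff_empty]; omega)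
    (by simp only [PySem.Set.empty, List.toFinset_nil, Finset.sdiff_empty]; omega)
  rw [hof] at hloop
  exact congrArg (fun d => (PySem.Dict.items d).map
    (fun q : (Int × Int) × Int => (q.1.1, q.1.2, q.2))) hloop
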